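-- pv_equiv track=rewrite | github.com/BayarBerkeley/Rosalind | Catalan Numbers and RNA Secondary Structures/Catalan_Numbers_and_RNA_Secondary_Structures.py | find_even_base
-- ===== SOURCE A (Python) =====
-- def find_even_base(sequence):
--     first_base = sequence[0]
--     base_seq = {'A':'U','U':'A','G':'C','C':'G'}
--     even_m = []
--     count_base = {'A':0,'U':0,'G':0,'C':0}
--     for i in range(len(sequence)):
--         if i == 0:
--             continue
--
--         if sequence[i] == base_seq[first_base] and i%2==1 and count_base['A'] == count_base['U'] and count_base['C'] == count_base['G']:
--             even_m.append(i + 1)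
--
--         if sequence[i] == 'A':
--             count_base['A'] += 1
--         elif sequence[i] == 'U':
--             count_base['U'] += 1
--         elif sequence[i] == 'G':
--             count_base['G'] += 1
--         elif sequence[i] == 'C':
--             count_base['C'] += 1
--
--     return even_m
-- ===== SOURCE B (Python) =====
-- def find_even_base(sequence):
--     # Build-then-filter: prefix balance arrays over the tail, then one comprehension.
--     target = {'A': 'U', 'U': 'A', 'G': 'C', 'C': 'G'}[sequence[0]]
--     tail = sequence[1:]
--     au = []
--     cg = []
--     a = c = 0
--     for ch in tail:
--         au.append(a)
--         cg.append(c)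
--         a += (ch == 'A') - (ch == 'U')
--         c += (ch == 'C') - (ch == 'G')
--     return [j + 2 for j, ch in enumerate(tail)
--             if ch == target and j % 2 == 0 and au[j] == 0 and cg[j] == 0]
-- ===== Notes on version B (the rewrite author's own statement) =====
-- stated objective: alternative
-- what changed: Replaces the single interleaved loop with running count dicts by a build-then-filter decomposition: one pass precomputes prefix A-minus-U and C-minus-G balance arrays over the tail, then a separate comprehension over enumerate(tail) emits the positions.
-- outside the precondition, e.g. on find_even_base('a'): A returns [], B raises KeyError; on find_even_base(''): A raises IndexError, B raises IndexError; on find_even_base('XAU'): A raises KeyError, B raises KeyError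
import Mathlib
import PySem

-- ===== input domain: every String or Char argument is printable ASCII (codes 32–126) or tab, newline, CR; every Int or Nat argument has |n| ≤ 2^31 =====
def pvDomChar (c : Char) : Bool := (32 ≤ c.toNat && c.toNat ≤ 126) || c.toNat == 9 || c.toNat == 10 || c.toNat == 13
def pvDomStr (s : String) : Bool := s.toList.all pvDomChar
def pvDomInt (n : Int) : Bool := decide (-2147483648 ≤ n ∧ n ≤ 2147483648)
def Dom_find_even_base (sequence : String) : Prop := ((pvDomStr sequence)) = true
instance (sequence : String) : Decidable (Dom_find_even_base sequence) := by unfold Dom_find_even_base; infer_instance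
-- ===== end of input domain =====

-- B replaces A's single interleaved loop (running count dict + emit) by a build-then-filter
-- decomposition: prefix balance arrays over the tail, then a separate filtering pass.

-- ===== PORT A =====
-- loop body of A: state (even_m, count_base), index i, character sequence[i]
def pvStepA (t : Char) (st : List Int × PySem.Dict Char Int) (i : Int) (ch : Char) :
    List Int × PySem.Dict Char Int :=
  if i = 0 then st
  else
    let even_m := st.1
    let cb := st.2
    let even_m :=
      if ch = t ∧ PySem.Int.mod i 2 = 1 ∧ cb.getD 'A' 0 = cb.getD 'U' 0 ∧
          cb.getD 'C' 0 = cb.getD 'G' 0 then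
        even_m ++ [i + 1]
      else even_m
    let cb :=
      if ch = 'A' then cb.insert 'A' (cb.getD 'A' 0 + 1)
      else if ch = 'U' then cb.insert 'U' (cb.getD 'U' 0 + 1)
      else if ch = 'G' then cb.insert 'G' (cb.getD 'G' 0 + 1)
      else if ch = 'C' then cb.insert 'C' (cb.getD 'C' 0 + 1)
      else cb
    (even_m, cb)

def find_even_base (sequence : String) : List Int :=
  let cs := sequence.toList
  let first_base := PySem.List.pyGetD cs 0 ' '      -- sequence[0]; Pre_ excludes the empty string
  let base_seq : PySem.Dict Char Char :=
    ((((PySem.Dict.empty).insert 'A' 'U').insert 'U' 'A').insert 'G' 'C').insert 'C' 'G'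
  let t := base_seq.getD first_base ' '             -- base_seq[first_base]; Pre_ excludes KeyError
  let init : List Int × PySem.Dict Char Int :=
    ([], ((((PySem.Dict.empty).insert 'A' 0).insert 'U' 0).insert 'G' 0).insert 'C' 0)
  ((PySem.List.pyRange 0 (cs.length : Int) 1).foldl
      (fun st i => pvStepA t st i (PySem.List.pyGetD cs i ' ')) init).1

-- ===== PORT B =====
-- the prefix-array building loop: emit current balance, then update it
def pvScan (p n : Char) : List Char → Int → List Int
  | [], _ => []
  | ch :: rest, a =>
      a :: pvScan p n rest (a + (if ch = p then 1 else 0) - (if ch = n then 1 else 0))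

def find_even_base_alt (sequence : String) : List Int :=
  let cs := sequence.toList
  let base_seq : PySem.Dict Char Char :=
    ((((PySem.Dict.empty).insert 'A' 'U').insert 'U' 'A').insert 'G' 'C').insert 'C' 'G'
  let t := base_seq.getD (PySem.List.pyGetD cs 0 ' ') ' '
  let tail := PySem.List.slice cs (some 1) none     -- sequence[1:]
  let au := pvScan 'A' 'U' tail 0
  let cg := pvScan 'C' 'G' tail 0
  (PySem.List.enumerate tail 0).filterMap (fun p =>
    if p.2 = t ∧ PySem.Int.mod p.1 2 = 0 ∧ PySem.List.pyGetD au p.1 0 = 0 ∧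
        PySem.List.pyGetD cg p.1 0 = 0 then
      some (p.1 + 2)
    else none)

-- ===== PRECONDITION & SPEC =====
-- Pre_ excludes the empty string (A raises IndexError on sequence[0]) and strings whose first
-- character is not one of the four RNA bases: there A raises KeyError once the loop reaches
-- index 1, and on 1-char such strings the loop never reaches the lookup, so A returns [] while
-- B's eager lookup raises KeyError (see the cite).
def Pre_find_even_base (sequence : String) : Prop :=
  sequence.toList ≠ [] ∧
    (sequence.toList.getD 0 ' ' = 'A' ∨ sequence.toList.getD 0 ' ' = 'U' ∨
     sequence.toList.getD 0 ' ' = 'G' ∨ sequence.toList.getD 0 ' ' = 'C')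
instance (sequence : String) : Decidable (Pre_find_even_base sequence) := by
  unfold Pre_find_even_base; infer_instance

def pvWitness_find_even_base : String := "AUAU"

def Spec_find_even_base (sequence : String) (out : List Int) : Prop :=
  out = find_even_base_alt sequence
instance (sequence : String) (out : List Int) : Decidable (Spec_find_even_base sequence out) := by
  unfold Spec_find_even_base; infer_instance

-- ===== CLAIM (what is proved, stated in full; the proofs are below) =====
def Claim_equal_find_even_base : Prop :=
  ∀ (sequence : String), Dom_find_even_base sequence → Pre_find_even_base sequence →
    Spec_find_even_base sequence (find_even_base sequence)

-- ===== LEMMAS AND PROOFS =====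

-- proof-side common characterisation of both programs on the tail
def pvCB (a u g c : Int) : PySem.Dict Char Int :=
  PySem.Dict.mk [('A', a), ('U', u), ('G', g), ('C', c)]

def pvSpecGo (t : Char) : List Char → Int → Int → Int → List Int
  | [], _, _, _ => []
  | ch :: rest, j, a, c =>
      (if ch = t ∧ j % 2 = 0 ∧ a = 0 ∧ c = 0 then [j + 2] else []) ++
        pvSpecGo t rest (j + 1)
          (a + (if ch = 'A' then 1 else 0) - (if ch = 'U' then 1 else 0))
          (c + (if ch = 'C' then 1 else 0) - (if ch = 'G' then 1 else 0))

theorem pvSpecGo_cons (t ch : Char) (rest : List Char) (j a c : Int) :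
    pvSpecGo t (ch :: rest) j a c =
      (if ch = t ∧ j % 2 = 0 ∧ a = 0 ∧ c = 0 then [j + 2] else []) ++
        pvSpecGo t rest (j + 1)
          (a + (if ch = 'A' then 1 else 0) - (if ch = 'U' then 1 else 0))
          (c + (if ch = 'C' then 1 else 0) - (if ch = 'G' then 1 else 0)) := rfl

theorem pvStepA_skip (t : Char) (st : List Int × PySem.Dict Char Int) (ch : Char) :
    pvStepA t st 0 ch = st := rfl

theorem pvLemA (t : Char) (l : List Char) : ∀ (s : Int), 1 ≤ s →
    ∀ (acc : List Int) (a u g c : Int),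
    ((PySem.List.enumerate l s).foldl (fun st p => pvStepA t st p.1 p.2)
        (acc, pvCB a u g c)).1
      = acc ++ pvSpecGo t l (s - 1) (a - u) (c - g) := by
  induction l with
  | nil => intro s hs acc a u g c; simp [PySem.List.enumerate, pvSpecGo]
  | cons ch rest ih =>
      intro s hs acc a u g c
      rw [PySem.List.enumerate_cons, List.foldl_cons]
      have hmod : PySem.Int.mod s 2 = s % 2 := PySem.Int.mod_eq_emod_of_pos (by omega)
      have hstep : pvStepA t (acc, pvCB a u g c) s ch =
          ((if ch = t ∧ (s - 1) % 2 = 0 ∧ a - u = 0 ∧ c - g = 0 then acc ++ [s + 1] else acc),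
            pvCB (a + (if ch = 'A' then 1 else 0)) (u + (if ch = 'U' then 1 else 0))
              (g + (if ch = 'G' then 1 else 0)) (c + (if ch = 'C' then 1 else 0))) := by
        unfold pvStepA
        rw [if_neg (by omega)]
        have hc : (ch = t ∧ PySem.Int.mod s 2 = 1 ∧
            (pvCB a u g c).getD 'A' 0 = (pvCB a u g c).getD 'U' 0 ∧
            (pvCB a u g c).getD 'C' 0 = (pvCB a u g c).getD 'G' 0) ↔
            (ch = t ∧ (s - 1) % 2 = 0 ∧ a - u = 0 ∧ c - g = 0) := by
          rw [show (pvCB a u g c).getD 'A' 0 = a from rfl,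
            show (pvCB a u g c).getD 'U' 0 = u from rfl,
            show (pvCB a u g c).getD 'G' 0 = g from rfl,
            show (pvCB a u g c).getD 'C' 0 = c from rfl, hmod]
          constructor
          · rintro ⟨h1, h2, h3, h4⟩; exact ⟨h1, by omega, by omega, by omega⟩
          · rintro ⟨h1, h2, h3, h4⟩; exact ⟨h1, by omega, by omega, by omega⟩
        simp only [hc]
        by_cases hA : ch = 'A'
        · subst hA; simp [pvCB, PySem.Dict.insert, PySem.Dict.getD, PySem.Dict.get?_mk_cons]
        by_cases hU : ch = 'U'
        · subst hU; simp [pvCB, PySem.Dict.insert, PySem.Dict.getD, PySem.Dict.get?_mk_cons]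
        by_cases hG : ch = 'G'
        · subst hG; simp [pvCB, PySem.Dict.insert, PySem.Dict.getD, PySem.Dict.get?_mk_cons]
        by_cases hC : ch = 'C'
        · subst hC; simp [pvCB, PySem.Dict.insert, PySem.Dict.getD, PySem.Dict.get?_mk_cons]
        · simp [hA, hU, hG, hC]
      rw [hstep, ih (s + 1) (by omega)]
      rw [pvSpecGo_cons]
      have hargA : a + (if ch = 'A' then (1:Int) else 0) - (u + (if ch = 'U' then 1 else 0))
          = a - u + (if ch = 'A' then (1:Int) else 0) - (if ch = 'U' then 1 else 0) := by ring
      have hargC : c + (if ch = 'C' then (1:Int) else 0) - (g + (if ch = 'G' then 1 else 0))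
          = c - g + (if ch = 'C' then (1:Int) else 0) - (if ch = 'G' then 1 else 0) := by ring
      rw [hargA, hargC, show s + 1 - 1 = s - 1 + 1 by ring]
      by_cases hcond : ch = t ∧ (s - 1) % 2 = 0 ∧ a - u = 0 ∧ c - g = 0
      · rw [if_pos hcond, if_pos hcond, show s + 1 = s - 1 + 2 by ring]
        simp
      · rw [if_neg hcond, if_neg hcond]
        simp

theorem pvGetD_append_eq (pre : List Int) (x : Int) (l : List Int) :
    PySem.List.pyGetD (pre ++ x :: l) ((pre.length : Int)) 0 = x := by
  rw [PySem.List.pyGetD_natCast]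
  simp [List.getD]

theorem pvLemB (t : Char) (l : List Char) : ∀ (s : Int) (pau pcg : List Int) (a c : Int),
    (pau.length : Int) = s → (pcg.length : Int) = s →
    (PySem.List.enumerate l s).filterMap (fun p =>
        if p.2 = t ∧ PySem.Int.mod p.1 2 = 0 ∧
            PySem.List.pyGetD (pau ++ pvScan 'A' 'U' l a) p.1 0 = 0 ∧
            PySem.List.pyGetD (pcg ++ pvScan 'C' 'G' l c) p.1 0 = 0 then
          some (p.1 + 2)
        else none)
      = pvSpecGo t l s a c := by
  induction l with
  | nil => intro s pau pcg a c h1 h2; simp [PySem.List.enumerate, pvSpecGo]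
  | cons ch rest ih =>
      intro s pau pcg a c h1 h2
      rw [PySem.List.enumerate_cons, List.filterMap_cons]
      have hmod : PySem.Int.mod s 2 = s % 2 := PySem.Int.mod_eq_emod_of_pos (by omega)
      have hrec : (pau ++ pvScan 'A' 'U' (ch :: rest) a) =
          ((pau ++ [a]) ++ pvScan 'A' 'U' rest
            (a + (if ch = 'A' then 1 else 0) - (if ch = 'U' then 1 else 0))) := by
        rw [pvScan]; simp
      have hrec2 : (pcg ++ pvScan 'C' 'G' (ch :: rest) c) =
          ((pcg ++ [c]) ++ pvScan 'C' 'G' rest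
            (c + (if ch = 'C' then 1 else 0) - (if ch = 'G' then 1 else 0))) := by
        rw [pvScan]; simp
      have hau : PySem.List.pyGetD ((pau ++ [a]) ++ pvScan 'A' 'U' rest
          (a + (if ch = 'A' then 1 else 0) - (if ch = 'U' then 1 else 0))) s 0 = a := by
        rw [List.append_assoc, List.singleton_append, ← h1]
        exact pvGetD_append_eq pau a _
      have hcg : PySem.List.pyGetD ((pcg ++ [c]) ++ pvScan 'C' 'G' rest
          (c + (if ch = 'C' then 1 else 0) - (if ch = 'G' then 1 else 0))) s 0 = c := by
        rw [List.append_assoc, List.singleton_append, ← h2]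
        exact pvGetD_append_eq pcg c _
      rw [hrec, hrec2,
        ih (s + 1) (pau ++ [a]) (pcg ++ [c])
          (a + (if ch = 'A' then 1 else 0) - (if ch = 'U' then 1 else 0))
          (c + (if ch = 'C' then 1 else 0) - (if ch = 'G' then 1 else 0))
          (by simp; omega) (by simp; omega),
        pvSpecGo_cons]
      simp only [hau, hcg, hmod]
      by_cases hcond : ch = t ∧ s % 2 = 0 ∧ a = 0 ∧ c = 0
      · rw [if_pos hcond, if_pos hcond]; simp
      · rw [if_neg hcond, if_neg hcond]; simp

-- ===== VERDICT (by name: the statement is the Claim_ definition above) =====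
theorem find_even_base_spec : Claim_equal_find_even_base := by
  intro sequence _ hpre
  unfold Spec_find_even_base find_even_base find_even_base_alt
  obtain ⟨hne, _⟩ := hpre
  obtain ⟨c0, rest, hcs⟩ : ∃ c0 rest, sequence.toList = c0 :: rest := by
    cases h : sequence.toList with
    | nil => exact absurd h hne
    | cons x xs => exact ⟨x, xs, rfl⟩
  simp only [hcs]
  rw [PySem.List.slice_from_one]
  simp only [List.tail_cons]
  have hmap := PySem.List.enumerate_eq_map_pyRange (xs := c0 :: rest) (d := ' ')
  rw [show (PySem.List.len (c0 :: rest)) = ((c0 :: rest).length : Int) by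
        simp [PySem.List.len_eq]] at hmap
  rw [← List.foldl_map (f := fun j => (j, PySem.List.pyGetD (c0 :: rest) j ' '))
        (g := fun st (p : Int × Char) => pvStepA _ st p.1 p.2), ← hmap]
  rw [PySem.List.enumerate_cons, List.foldl_cons, pvStepA_skip]
  have hinit : ((((PySem.Dict.empty).insert 'A' (0:Int)).insert 'U' 0).insert 'G' 0).insert 'C' 0
      = pvCB 0 0 0 0 := by decide
  rw [hinit, show (0:Int) + 1 = 1 by norm_num, pvLemA _ rest 1 le_rfl [] 0 0 0 0]
  have hB := pvLemB (((((PySem.Dict.empty.insert 'A' 'U').insert 'U' 'A').insert 'G' 'C').insert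
        'C' 'G').getD (PySem.List.pyGetD (c0 :: rest) 0 ' ') ' ')
      rest 0 [] [] 0 0 (by simp) (by simp)
  simp only [List.nil_append] at hB
  rw [show (1:Int) - 1 = 0 by norm_num, show (0:Int) - 0 = 0 by norm_num, List.nil_append]
  exact hB.symm
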